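-- pv_equiv track=rewrite | github.com/park0503/algorithm | completeSearch/programmers_cs_1.py | solution
-- ===== SOURCE A (Python) =====
-- def solution(answers):
--     sik = [
--         [1, 2, 3, 4, 5],
--         [2, 1, 2, 3, 2, 4, 2, 5],
--         [3, 3, 1, 1, 2, 2, 4, 4, 5, 5]
--     ]
--     count = [0 for i in range(3)]
--     answer = []
--     for i in range(len(answers)):
--         for j in range(3):
--             if answers[i] == sik[j][i % len(sik[j])]:
--                 count[j] += 1
--     maxScore = max(count)
--     for i in range(3):
--         if count[i] == maxScore:
--             answer.append(i + 1)
--     return answer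
-- ===== SOURCE B (Python) =====
-- def _score(pattern, answers):
--     # one pass per supervisor: consume the pattern cyclically with an explicit
--     # "remaining" list that is refilled whenever it runs out
--     s = 0
--     rest = []
--     for a in answers:
--         if not rest:
--             rest = list(pattern)
--         s += (a == rest.pop(0))
--     return s
--
--
-- def solution(answers):
--     patterns = [
--         [1, 2, 3, 4, 5],
--         [2, 1, 2, 3, 2, 4, 2, 5],
--         [3, 3, 1, 1, 2, 2, 4, 4, 5, 5],
--     ]
--     scores = [_score(p, answers) for p in patterns]
--     m = max(scores)
--     return [i + 1 for i, s in enumerate(scores) if s == m]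
-- ===== Notes on version B (the rewrite author's own statement) =====
-- stated objective: alternative
-- what changed: Inverted the loop nesting: instead of one pass over answers incrementing all three counters with i % len index arithmetic, B scores each supervisor in its own pass that consumes the pattern cyclically via an explicit refill-and-pop list (no modulo indexing), then selects the maxima by enumerate/filter.
import Mathlib
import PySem

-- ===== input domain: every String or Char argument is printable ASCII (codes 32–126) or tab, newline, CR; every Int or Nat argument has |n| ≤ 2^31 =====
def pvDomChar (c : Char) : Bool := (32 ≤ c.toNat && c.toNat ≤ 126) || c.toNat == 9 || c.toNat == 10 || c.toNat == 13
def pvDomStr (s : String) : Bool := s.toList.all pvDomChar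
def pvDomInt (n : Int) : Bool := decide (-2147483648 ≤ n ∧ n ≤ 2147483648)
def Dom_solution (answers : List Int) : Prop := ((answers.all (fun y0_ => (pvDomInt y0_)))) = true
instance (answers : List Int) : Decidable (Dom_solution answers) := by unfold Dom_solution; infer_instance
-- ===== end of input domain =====

-- B scores each supervisor in its own pass, consuming the pattern cyclically via an
-- explicit refill-and-pop list instead of A's single pass with i % len index arithmetic
-- over all three counters (objective: alternative decomposition, same cost).


-- ===== PORT A =====
def solution (answers : List Int) : List Int :=
  let sik : List (List Int) := [[1, 2, 3, 4, 5], [2, 1, 2, 3, 2, 4, 2, 5], [3, 3, 1, 1, 2, 2, 4, 4, 5, 5]]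
  let count : List Int := (List.range 3).map (fun _ => (0 : Int))
  let count : List Int :=
    (PySem.List.pyRange 0 (PySem.List.len answers) 1).foldl (fun count i =>
      (PySem.List.pyRange 0 3 1).foldl (fun count j =>
        if PySem.List.pyGetD answers i 0
            = PySem.List.pyGetD (PySem.List.pyGetD sik j [])
                (PySem.Int.mod i (PySem.List.len (PySem.List.pyGetD sik j []))) 0
        then count.set j.toNat (PySem.List.pyGetD count j 0 + 1)  -- count[j] += 1; j ∈ {0,1,2} so j.toNat is exact
        else count) count) count
  let maxScore : Int := (PySem.List.max? count (fun y => y)).getD 0  -- count has 3 elements, never none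
  (PySem.List.pyRange 0 3 1).foldl (fun answer i =>
    if PySem.List.pyGetD count i 0 = maxScore then answer ++ [i + 1] else answer) []

-- ===== PORT B =====
-- B's _score loop: fold over answers carrying (rest, s); rest is refilled from pat when empty,
-- then its head is popped.  (The [] match arm is unreachable: pat is always a nonempty pattern.)
def scoreGo (pat : List Int) : List Int → List Int → Int → Int
  | [], _, s => s
  | a :: as, rest, s =>
    match (if rest.isEmpty then pat else rest) with
    | [] => s
    | p :: ps => scoreGo pat as ps (s + if a = p then 1 else 0)

def solution_alt (answers : List Int) : List Int :=
  let patterns : List (List Int) := [[1, 2, 3, 4, 5], [2, 1, 2, 3, 2, 4, 2, 5], [3, 3, 1, 1, 2, 2, 4, 4, 5, 5]]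
  let scores := patterns.map (fun p => scoreGo p answers [] 0)
  let m : Int := (PySem.List.max? scores (fun y => y)).getD 0  -- scores has 3 elements, never none
  ((PySem.List.enumerate scores 0).filter (fun is => is.2 == m)).map (fun is => is.1 + 1)

-- ===== PRECONDITION & SPEC =====
def Spec_solution (answers : List Int) (out : List Int) : Prop := out = solution_alt answers
instance (answers : List Int) (out : List Int) : Decidable (Spec_solution answers out) := by unfold Spec_solution; infer_instance

-- ===== CLAIM (what is proved, stated in full; the proofs are below) =====
def Claim_equal_solution : Prop := ∀ (answers : List Int), Dom_solution answers → Spec_solution answers (solution answers)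

-- ===== LEMMAS AND PROOFS =====

-- common specification: number of hits of xs against pat consumed cyclically from offset k
def cntIdx (pat : List Int) (xs : List Int) (k : Nat) : Int :=
  match xs with
  | [] => 0
  | a :: as => (if a = pat.getD (k % pat.length) 0 then 1 else 0) + cntIdx pat as (k + 1)

theorem mod_succ_eq (k L : Nat) :
    (k + 1) % L = if k % L + 1 = L then 0 else k % L + 1 := by
  rcases Nat.eq_zero_or_pos L with hL | hL
  · subst hL; simp
  have hk : k % L < L := Nat.mod_lt _ hL
  rw [← Nat.mod_add_mod]
  by_cases h : k % L + 1 = L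
  · simp [h]
  · rw [Nat.mod_eq_of_lt (by omega)]
    simp [h]

-- B side: the refill-and-pop loop computes cntIdx
theorem scoreGo_eq_cntIdx (pat : List Int) (hp : pat ≠ []) :
    ∀ (as : List Int) (k : Nat) (s : Int),
      scoreGo pat as (if k % pat.length = 0 then [] else pat.drop (k % pat.length)) s
        = s + cntIdx pat as k := by
  intro as
  induction as with
  | nil => intro k s; simp [scoreGo, cntIdx]
  | cons a as ih =>
    intro k s
    have hL : 0 < pat.length := List.length_pos_iff.mpr hp
    have hk : k % pat.length < pat.length := Nat.mod_lt _ hL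
    have hrest : (if ((if k % pat.length = 0 then [] else pat.drop (k % pat.length)) : List Int).isEmpty
        then pat else (if k % pat.length = 0 then [] else pat.drop (k % pat.length)))
        = pat.drop (k % pat.length) := by
      by_cases h0 : k % pat.length = 0
      · simp [h0]
      · have hne : pat.drop (k % pat.length) ≠ [] :=
          List.ne_nil_of_length_pos (by rw [List.length_drop]; omega)
        simp [h0, List.isEmpty_iff, hne]
    have hdrop : pat.drop (k % pat.length) = pat[k % pat.length] :: pat.drop (k % pat.length + 1) :=
      List.drop_eq_getElem_cons hk
    have hms := mod_succ_eq k pat.length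
    have hnext : pat.drop (k % pat.length + 1)
        = (if (k + 1) % pat.length = 0 then [] else pat.drop ((k + 1) % pat.length)) := by
      by_cases h1 : (k + 1) % pat.length = 0
      · have hL' : k % pat.length + 1 = pat.length := by
          by_contra hc
          rw [hms, if_neg hc] at h1; omega
        simp [h1, hL']
      · have hc : k % pat.length + 1 ≠ pat.length := by
          intro hc; rw [hms, if_pos hc] at h1; exact h1 rfl
        have h2 : (k + 1) % pat.length = k % pat.length + 1 := by rw [hms, if_neg hc]
        rw [if_neg h1, h2]
    have hget : pat.getD (k % pat.length) 0 = pat[k % pat.length] := List.getD_eq_getElem _ _ hk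
    calc scoreGo pat (a :: as) (if k % pat.length = 0 then [] else pat.drop (k % pat.length)) s
        = scoreGo pat as (pat.drop (k % pat.length + 1))
            (s + if a = pat[k % pat.length] then 1 else 0) := by
          rw [scoreGo, hrest, hdrop]
      _ = s + cntIdx pat (a :: as) k := by
          rw [hnext, ih]
          simp only [cntIdx]
          rw [hget]
          ring
theorem scoreGo_zero (pat : List Int) (hp : pat ≠ []) (as : List Int) :
    scoreGo pat as [] 0 = cntIdx pat as 0 := by
  have h := scoreGo_eq_cntIdx pat hp as 0 0
  have hL : 0 < pat.length := List.length_pos_iff.mpr hp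
  simpa [Nat.zero_mod] using h

-- cntIdx as a sum over indices (bridge to A's indexed traversal)
theorem cntIdx_eq_sum (pat : List Int) :
    ∀ (xs : List Int) (k : Nat),
      cntIdx pat xs k
        = ((List.range xs.length).map (fun i =>
            if xs.getD i 0 = pat.getD ((k + i) % pat.length) 0 then (1 : Int) else 0)).sum := by
  intro xs
  induction xs with
  | nil => intro k; simp [cntIdx]
  | cons a as ih =>
    intro k
    rw [cntIdx, ih (k + 1)]
    rw [List.length_cons, List.range_succ_eq_map, List.map_cons, List.map_map, List.sum_cons]
    have hmap : ∀ i ∈ List.range as.length,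
        ((fun i => if (a :: as).getD i 0 = pat.getD ((k + i) % pat.length) 0 then (1:Int) else 0) ∘ Nat.succ) i
          = (fun i => if as.getD i 0 = pat.getD ((k + 1 + i) % pat.length) 0 then (1:Int) else 0) i := by
      intro i _
      have hidx : k + (i + 1) = k + 1 + i := by omega
      simp [Function.comp, Nat.succ_eq_add_one, hidx]
    rw [List.map_congr_left hmap]
    simp

-- evaluate one step of A's outer loop on a concrete 3-counter list
theorem stepA_eval (answers : List Int) (c0 c1 c2 : Int) (n : Nat) :
    (PySem.List.pyRange 0 3 1).foldl (fun count j =>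
        if PySem.List.pyGetD answers (n : Int) 0
            = PySem.List.pyGetD (PySem.List.pyGetD ([[1, 2, 3, 4, 5], [2, 1, 2, 3, 2, 4, 2, 5],
                  [3, 3, 1, 1, 2, 2, 4, 4, 5, 5]] : List (List Int)) j [])
                (PySem.Int.mod (n : Int) (PySem.List.len (PySem.List.pyGetD ([[1, 2, 3, 4, 5],
                  [2, 1, 2, 3, 2, 4, 2, 5], [3, 3, 1, 1, 2, 2, 4, 4, 5, 5]] : List (List Int)) j []))) 0
        then List.set count j.toNat (PySem.List.pyGetD count j 0 + 1)
        else count) [c0, c1, c2]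
      = [c0 + (if answers.getD n 0 = ([1,2,3,4,5] : List Int).getD (n % 5) 0 then 1 else 0),
         c1 + (if answers.getD n 0 = ([2,1,2,3,2,4,2,5] : List Int).getD (n % 8) 0 then 1 else 0),
         c2 + (if answers.getD n 0 = ([3,3,1,1,2,2,4,4,5,5] : List Int).getD (n % 10) 0 then 1 else 0)] := by
  have hrange : PySem.List.pyRange 0 3 1 = [0, 1, 2] := by decide
  have hans : PySem.List.pyGetD answers (n : Int) 0 = answers.getD n 0 := by
    rw [PySem.List.pyGetD_natCast]
  have hmod : ∀ (L : Nat) (p : List Int), p.length = L →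
      PySem.List.pyGetD p (PySem.Int.mod (n : Int) (PySem.List.len p)) 0 = p.getD (n % L) 0 := by
    intro L p hp
    have h1 : PySem.Int.mod (n : Int) (PySem.List.len p) = ((n % L : Nat) : Int) := by
      simp [PySem.List.len_eq, ← hp]
    rw [h1, PySem.List.pyGetD_natCast]
  have h0 : PySem.List.pyGetD ([[1, 2, 3, 4, 5], [2, 1, 2, 3, 2, 4, 2, 5],
      [3, 3, 1, 1, 2, 2, 4, 4, 5, 5]] : List (List Int)) (0 : Int) [] = [1,2,3,4,5] := by decide
  have h1 : PySem.List.pyGetD ([[1, 2, 3, 4, 5], [2, 1, 2, 3, 2, 4, 2, 5],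
      [3, 3, 1, 1, 2, 2, 4, 4, 5, 5]] : List (List Int)) (1 : Int) [] = [2,1,2,3,2,4,2,5] := by decide
  have h2 : PySem.List.pyGetD ([[1, 2, 3, 4, 5], [2, 1, 2, 3, 2, 4, 2, 5],
      [3, 3, 1, 1, 2, 2, 4, 4, 5, 5]] : List (List Int)) (2 : Int) [] = [3,3,1,1,2,2,4,4,5,5] := by decide
  rw [hrange]
  simp only [List.foldl_cons, List.foldl_nil, h0, h1, h2]
  rw [hans, hmod 5 [1,2,3,4,5] rfl, hmod 8 [2,1,2,3,2,4,2,5] rfl, hmod 10 [3,3,1,1,2,2,4,4,5,5] rfl]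
  split_ifs <;>
    simp [PySem.List.pyGetD, PySem.List.pyGet?, PySem.List.pyIdx?, List.set]

-- A's counting fold equals the three index sums
theorem afold_eq (answers : List Int) : ∀ (n : Nat), n ≤ answers.length →
    (PySem.List.pyRange 0 (n : Int) 1).foldl (fun count i =>
      (PySem.List.pyRange 0 3 1).foldl (fun count j =>
        if PySem.List.pyGetD answers i 0
            = PySem.List.pyGetD (PySem.List.pyGetD ([[1, 2, 3, 4, 5], [2, 1, 2, 3, 2, 4, 2, 5],
                  [3, 3, 1, 1, 2, 2, 4, 4, 5, 5]] : List (List Int)) j [])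
                (PySem.Int.mod i (PySem.List.len (PySem.List.pyGetD ([[1, 2, 3, 4, 5],
                  [2, 1, 2, 3, 2, 4, 2, 5], [3, 3, 1, 1, 2, 2, 4, 4, 5, 5]] : List (List Int)) j []))) 0
        then List.set count j.toNat (PySem.List.pyGetD count j 0 + 1)
        else count) count) ((List.range 3).map (fun _ => (0 : Int)))
    = [((List.range n).map (fun i => if answers.getD i 0 = ([1,2,3,4,5] : List Int).getD (i % 5) 0 then (1:Int) else 0)).sum,
       ((List.range n).map (fun i => if answers.getD i 0 = ([2,1,2,3,2,4,2,5] : List Int).getD (i % 8) 0 then (1:Int) else 0)).sum,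
       ((List.range n).map (fun i => if answers.getD i 0 = ([3,3,1,1,2,2,4,4,5,5] : List Int).getD (i % 10) 0 then (1:Int) else 0)).sum] := by
  intro n
  induction n with
  | zero => intro _; simp [PySem.List.pyRange_one_eq_nil]
  | succ m ih =>
    intro h
    have hm : m ≤ answers.length := Nat.le_of_succ_le h
    have hsplit : PySem.List.pyRange 0 ((m + 1 : Nat) : Int) 1
        = PySem.List.pyRange 0 (m : Int) 1 ++ [(m : Int)] := by
      push_cast
      exact PySem.List.pyRange_one_succ_right (by positivity)
    rw [hsplit, List.foldl_append, ih hm]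
    simp only [List.foldl_cons, List.foldl_nil]
    rw [stepA_eval answers _ _ _ m]
    simp [List.range_succ]

-- post-processing: A's max-and-append loop over [0,1,2] equals B's enumerate/filter/map on a 3-list
theorem post_eq (g0 g1 g2 : Int) :
    (PySem.List.pyRange 0 3 1).foldl (fun answer i =>
        if PySem.List.pyGetD [g0, g1, g2] i 0
            = (PySem.List.max? [g0, g1, g2] (fun y => y)).getD 0
        then answer ++ [i + 1] else answer) []
      = ((PySem.List.enumerate [g0, g1, g2] 0).filter
          (fun is => is.2 == (PySem.List.max? [g0, g1, g2] (fun y => y)).getD 0)).map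
          (fun is => is.1 + 1) := by
  have hrange : PySem.List.pyRange 0 3 1 = [0, 1, 2] := by decide
  rw [hrange]
  have hmax : (PySem.List.max? [g0, g1, g2] (fun y => y)).getD 0 = max (max g0 g1) g2 := by
    rw [PySem.List.max?_id_cons]
    simp [max_assoc]
  rw [hmax]
  simp only [List.foldl_cons, List.foldl_nil]
  simp only [PySem.List.enumerate_cons, PySem.List.enumerate_nil, List.filter_cons, List.filter_nil]
  simp only [PySem.List.pyGetD_ofNat', beq_iff_eq]
  have e0 : ([g0, g1, g2] : List Int).getD 0 0 = g0 := rfl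
  have e1 : ([g0, g1, g2] : List Int).getD 1 0 = g1 := rfl
  have e2 : ([g0, g1, g2] : List Int).getD 2 0 = g2 := rfl
  rw [e0, e1, e2]
  clear hrange hmax e0 e1 e2
  split_ifs <;> simp

-- ===== VERDICT (by name: the statement is the Claim_ definition above) =====
theorem solution_spec : Claim_equal_solution := by
  intro answers _
  unfold Spec_solution
  show solution answers = solution_alt answers
  have hs : ∀ pat : List Int, pat ≠ [] → scoreGo pat answers [] 0
      = ((List.range answers.length).map (fun i =>
          if answers.getD i 0 = pat.getD (i % pat.length) 0 then (1 : Int) else 0)).sum := by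
    intro pat hp
    rw [scoreGo_zero pat hp, cntIdx_eq_sum]
    simp
  have hlen : PySem.List.len answers = (answers.length : Int) := PySem.List.len_eq _
  have hA := afold_eq answers answers.length le_rfl
  simp only [solution, solution_alt, List.map_cons, List.map_nil]
  rw [hlen, hA,
    hs [1,2,3,4,5] (by decide), hs [2,1,2,3,2,4,2,5] (by decide),
    hs [3,3,1,1,2,2,4,4,5,5] (by decide)]
  exact post_eq _ _ _
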